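-- pv_equiv track=rewrite | github.com/EckPhi/conan-check-updates | src/conan_check_updates/__main__.py | highlight_version_diff
-- ===== SOURCE A (Python) =====
-- class Colors:
--     """ANSI color codes."""
--
--     RESET = "\033[0m"
--     BOLD = "\033[1m"
--     DISABLE = "\033[2m"
--     UNDERLINE = "\033[4m"
--     REVERSE = "\033[07m"
--     RED = "\033[31m"
--     GREEN = "\033[32m"
--     ORANGE = "\033[33m"
--     BLUE = "\033[34m"
--     PURPLE = "\033[35m"
--     CYAN = "\033[36m"
--
-- def colored(txt: str, *colors: str) -> str:
--     return "".join((*colors, txt, Colors.RESET))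
--
-- def highlight_version_diff(version: str, compare: str, highlight=Colors.RED) -> str:
--     """Highlight differing parts of version string."""
--     i_first_diff = next(
--         (i for i, (s1, s2) in enumerate(zip(version, compare)) if s1 != s2),
--         None,
--     )
--     if i_first_diff is None:
--         return version
--     return version[:i_first_diff] + colored(version[i_first_diff:], highlight)
-- ===== SOURCE B (Python) =====
-- RESET = "\033[0m"
-- RED = "\033[31m"
--
-- def highlight_version_diff(version: str, compare: str, highlight=RED) -> str:
--     """Highlight differing parts of version string.
--
--     Binary search for the length of the common prefix (the predicate
--     version[:k] == compare[:k] is monotone), instead of a linear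
--     first-difference scan."""
--     n = min(len(version), len(compare))
--     lo, hi = 0, n
--     while lo < hi:
--         mid = (lo + hi + 1) // 2
--         if version[:mid] == compare[:mid]:
--             lo = mid
--         else:
--             hi = mid - 1
--     if lo == n:
--         return version
--     return version[:lo] + highlight + version[lo:] + RESET
-- ===== Notes on version B (the rewrite author's own statement) =====
-- stated objective: alternative
-- what changed: Replaces A's linear first-difference scan (generator over enumerate(zip(version, compare)) with next(..., None)) by a binary search for the common-prefix length using the monotone predicate version[:k] == compare[:k], then slices once.
import Mathlib
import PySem

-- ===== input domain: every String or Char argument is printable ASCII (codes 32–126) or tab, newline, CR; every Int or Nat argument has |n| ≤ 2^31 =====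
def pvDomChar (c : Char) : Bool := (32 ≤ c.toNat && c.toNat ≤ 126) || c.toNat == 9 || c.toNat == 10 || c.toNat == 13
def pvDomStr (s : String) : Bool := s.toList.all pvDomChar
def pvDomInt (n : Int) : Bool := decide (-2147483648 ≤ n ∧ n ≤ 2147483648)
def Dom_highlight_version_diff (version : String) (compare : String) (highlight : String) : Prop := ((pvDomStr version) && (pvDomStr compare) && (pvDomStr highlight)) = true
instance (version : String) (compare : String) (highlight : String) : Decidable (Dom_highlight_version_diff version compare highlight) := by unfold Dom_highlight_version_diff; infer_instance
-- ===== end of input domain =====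

-- B replaces A's linear first-difference scan (generator over enumerate(zip(...)))
-- by a binary search for the common-prefix length; objective: alternative algorithm.


-- ===== PORT A =====
-- Colors.RESET
def pvReset : List Char := ['\x1b', '[', '0', 'm']

-- colored(txt, *colors) = "".join((*colors, txt, RESET))
def pvColored (txt : List Char) (colors : List (List Char)) : List Char :=
  PySem.Chars.join [] (colors ++ [txt, pvReset])

-- next((i for i,(s1,s2) in enumerate(zip(version, compare)) if s1 != s2), None)
-- then the two branches; slices v[:i] / v[i:] via PySem.List.slice.
def highlight_version_diff (version : String) (compare : String) (highlight : String) : String :=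
  let v := version.toList
  let i? := List.findIdx? (fun p => p.1 != p.2) (v.zip compare.toList)
  match i? with
  | none => version
  | some i =>
      String.mk (PySem.List.slice v none (some (i : Int)) ++
                 pvColored (PySem.List.slice v (some (i : Int)) none) [highlight.toList])

-- ===== PORT B =====
-- the while-loop of Source B: binary search on the monotone predicate version[:k] == compare[:k]
def pvBsearch (v c : List Char) (lo hi : Nat) : Nat :=
  if lo < hi then
    let mid := (lo + hi + 1) / 2
    if v.take mid = c.take mid then pvBsearch v c mid hi else pvBsearch v c lo (mid - 1)
  else lo
termination_by hi - lo
decreasing_by all_goals omega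

def highlight_version_diff_alt (version : String) (compare : String) (highlight : String) : String :=
  let v := version.toList
  let c := compare.toList
  let n := min v.length c.length
  let lo := pvBsearch v c 0 n
  if lo = n then version
  else String.mk (v.take lo ++ highlight.toList ++ v.drop lo ++ pvReset)

-- ===== PRECONDITION & SPEC =====
def Spec_highlight_version_diff (version : String) (compare : String) (highlight : String) (out : String) : Prop := out = highlight_version_diff_alt version compare highlight
instance (version : String) (compare : String) (highlight : String) (out : String) : Decidable (Spec_highlight_version_diff version compare highlight out) := by unfold Spec_highlight_version_diff; infer_instance

-- ===== CLAIM (what is proved, stated in full; the proofs are below) =====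
def Claim_equal_highlight_version_diff : Prop := ∀ (version : String) (compare : String) (highlight : String), Dom_highlight_version_diff version compare highlight → Spec_highlight_version_diff version compare highlight (highlight_version_diff version compare highlight)

-- ===== LEMMAS AND PROOFS =====

-- length of the longest common prefix (proof-side specification)
def pvLcp : List Char → List Char → Nat
  | x :: xs, y :: ys => if x = y then pvLcp xs ys + 1 else 0
  | _, _ => 0

theorem pvLcp_le_min : ∀ (v c : List Char), pvLcp v c ≤ min v.length c.length := by
  intro v
  induction v with
  | nil => intro c; cases c <;> simp [pvLcp]
  | cons x xs ih =>
    intro c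
    cases c with
    | nil => simp [pvLcp]
    | cons y ys =>
      simp only [pvLcp]
      split_ifs with h
      · have := ih ys; simp [List.length_cons]; omega
      · omega

theorem pvFindIdx_eq_lcp : ∀ (v c : List Char),
    List.findIdx? (fun p => p.1 != p.2) (v.zip c) =
      (if pvLcp v c = min v.length c.length then none else some (pvLcp v c)) := by
  intro v
  induction v with
  | nil => intro c; simp [pvLcp]
  | cons x xs ih =>
    intro c
    cases c with
    | nil => simp [pvLcp]
    | cons y ys =>
      simp only [List.zip_cons_cons, List.findIdx?_cons, pvLcp, List.length_cons]
      by_cases h : x = y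
      · simp only [h, bne_self_eq_false, Bool.false_eq_true, if_false, ih ys]
        have hle := pvLcp_le_min xs ys
        by_cases he : pvLcp xs ys = min xs.length ys.length
        · simp [he]
        · simp [he]
      · have hb : (x != y) = true := bne_iff_ne.mpr h
        simp [hb, h]

-- take-equality is characterised by the lcp: equal k-prefixes iff k ≤ lcp or the lists are equal
theorem pvTake_eq_iff : ∀ (v c : List Char) (k : Nat),
    v.take k = c.take k ↔ (k ≤ pvLcp v c ∨ v = c) := by
  intro v
  induction v with
  | nil =>
    intro c k
    cases c with
    | nil => simp
    | cons y ys =>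
      cases k with
      | zero => simp [pvLcp]
      | succ k => simp [pvLcp]
  | cons x xs ih =>
    intro c k
    cases c with
    | nil =>
      cases k with
      | zero => simp [pvLcp]
      | succ k => simp [pvLcp]
    | cons y ys =>
      cases k with
      | zero => simp [pvLcp]
      | succ k =>
        simp only [List.take_succ_cons, List.cons.injEq, pvLcp]
        constructor
        · rintro ⟨rfl, ht⟩
          rcases (ih ys k).mp ht with h | rfl
          · left; simp; omega
          · right; exact ⟨rfl, rfl⟩
        · rintro (h | ⟨rfl, rfl⟩)
          · split_ifs at h with hxy
            · exact ⟨hxy, (ih ys k).mpr (Or.inl (by omega))⟩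
            · omega
          · exact ⟨rfl, rfl⟩

theorem pvLcp_eq_of_eq : ∀ (v : List Char), pvLcp v v = v.length := by
  intro v; induction v with
  | nil => simp [pvLcp]
  | cons x xs ih => simp [pvLcp, ih]

-- binary-search invariant: if lo ≤ lcp ≤ hi then the loop returns lcp
theorem pvBsearch_eq (v c : List Char) :
    ∀ (d lo hi : Nat), hi - lo = d → lo ≤ pvLcp v c → pvLcp v c ≤ hi →
      hi ≤ min v.length c.length → pvBsearch v c lo hi = pvLcp v c := by
  intro d
  induction d using Nat.strong_induction_on with
  | _ d ih =>
  intro lo hi hd h1 h2 h3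
  rw [pvBsearch]
  by_cases hl : lo < hi
  · simp only [if_pos hl]
    set mid := (lo + hi + 1) / 2 with hmid
    have hmlo : lo < mid := by omega
    have hmhi : mid ≤ hi := by omega
    by_cases ht : v.take mid = c.take mid
    · simp only [if_pos ht]
      have hm : mid ≤ pvLcp v c := by
        rcases (pvTake_eq_iff v c mid).mp ht with h | rfl
        · exact h
        · have := pvLcp_eq_of_eq v; simp at h3 ⊢; omega
      exact ih (hi - mid) (by omega) mid hi rfl hm h2 h3
    · simp only [if_neg ht]
      have hm : pvLcp v c < mid := by
        by_contra hc
        exact ht ((pvTake_eq_iff v c mid).mpr (Or.inl (by omega)))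
      exact ih (mid - 1 - lo) (by omega) lo (mid - 1) rfl h1 (by omega) (by omega)
  · simp only [if_neg hl]; omega

theorem pvColored_eq (txt h : List Char) :
    pvColored txt [h] = h ++ txt ++ pvReset := by
  simp [pvColored, PySem.Chars.join, List.intercalate, List.intersperse]

-- ===== VERDICT (by name: the statement is the Claim_ definition above) =====
theorem highlight_version_diff_spec : Claim_equal_highlight_version_diff := by
  intro version compare highlight _
  unfold Spec_highlight_version_diff
  simp only [highlight_version_diff, highlight_version_diff_alt]
  have hle := pvLcp_le_min version.toList compare.toList
  have hbs : pvBsearch version.toList compare.toList 0 (min version.toList.length compare.toList.length) = pvLcp version.toList compare.toList :=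
    pvBsearch_eq version.toList compare.toList _ 0 (min version.toList.length compare.toList.length) rfl (Nat.zero_le _) hle (le_refl _)
  rw [pvFindIdx_eq_lcp]
  by_cases he : pvLcp version.toList compare.toList = min version.toList.length compare.toList.length
  · rw [if_pos he, hbs, if_pos he]
  · rw [if_neg he, hbs, if_neg he]
    simp only [PySem.List.slice_to_natCast, PySem.List.slice_from_natCast, pvColored_eq]
    simp [List.append_assoc]
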